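-- pv_equiv track=rewrite | github.com/alex-snd/TRecover | src/trecover/utils/visualization.py | visualize_columns
-- ===== SOURCE A (Python) =====
-- from typing import List, Union
--
-- def visualize_columns(columns: List[str], delimiter: str = '', as_rows=False) -> Union[str, List[str]]:
--     """
--     Get the columns string representation.
--
--     Parameters
--     ----------
--     columns : List[str]
--         Columns for keyless reading.
--     delimiter : str
--         Delimiter for columns visualization.
--     as_rows : bool
--         Return visualization as a list of strings.
--
--     Returns
--     -------
--     Union[str, List[str]]:
--         Visualization as a string or list of strings.
--
--     """
--
--     if len(columns) == 0:
--         return ''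
--
--     rows = list()
--     columns = [list(column) for column in columns]
--     max_depth = max([len(column) for column in columns])
--
--     for d in range(max_depth):
--
--         row = str()
--         for c in range(len(columns)):
--             row += f'{delimiter}{columns[c][d]}' if d < len(columns[c]) else f'{delimiter} '
--
--         rows.append(f'{row}{delimiter}')
--
--     return rows if as_rows else '\n'.join(rows)
-- ===== SOURCE B (Python) =====
-- def visualize_columns(columns, delimiter='', as_rows=False):
--     """Column-major construction: grow every row while walking the columns once."""
--     if len(columns) == 0:
--         return ''
--     depth = max(len(col) for col in columns)
--     rows = [delimiter] * depth
--     for col in columns: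
--         padded = col + ' ' * (depth - len(col))
--         rows = [row + ch + delimiter for row, ch in zip(rows, padded)]
--     return rows if as_rows else '\n'.join(rows)
-- ===== Notes on version B (the rewrite author's own statement) =====
-- stated objective: alternative
-- what changed: B builds all rows simultaneously by a single column-major pass (each column appends its padded character plus delimiter to every row buffer) instead of A's row-major nested loops indexing columns[c][d]; B reproduces A everywhere in Python, including the as_rows=True list return, but Pre_ must exclude as_rows=True with nonempty columns only because the proof's fixed String return type cannot represent that list value.
-- outside the precondition, e.g. on visualize_columns(['ab'], '', True): A returns ['a', 'b'], B returns ['a', 'b']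
import Mathlib
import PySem

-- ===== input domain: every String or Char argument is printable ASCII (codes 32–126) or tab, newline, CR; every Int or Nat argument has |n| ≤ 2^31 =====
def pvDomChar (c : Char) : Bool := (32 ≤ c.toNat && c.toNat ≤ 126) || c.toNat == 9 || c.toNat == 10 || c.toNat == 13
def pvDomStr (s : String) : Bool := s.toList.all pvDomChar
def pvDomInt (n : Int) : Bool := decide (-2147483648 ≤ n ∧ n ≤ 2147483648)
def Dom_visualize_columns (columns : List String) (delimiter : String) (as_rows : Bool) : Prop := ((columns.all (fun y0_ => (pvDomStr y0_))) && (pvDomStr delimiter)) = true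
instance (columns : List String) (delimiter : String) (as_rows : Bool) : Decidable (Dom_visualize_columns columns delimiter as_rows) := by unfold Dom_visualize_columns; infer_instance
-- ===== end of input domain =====

-- B differs from A by decomposition only: one column-major pass growing all row buffers at once.
-- In Python, B reproduces A on EVERY input, including as_rows=True (both return the identical list of row
-- strings there); the Lean claim is restricted to the String-returning inputs only because this file's fixed
-- return type String cannot represent that list value.

-- ===== PORT A =====
-- literal port of A: row-major nested loops; strings handled as List Char
def visualize_columns (columns : List String) (delimiter : String) (as_rows : Bool) : String :=
  if columns.length = 0 then "" else
  let cols : List (List Char) := columns.map String.toList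
  let max_depth : Int :=
    (PySem.List.max? (cols.map (fun c => (c.length : Int))) (fun x => x)).getD 0
  let rows : List (List Char) :=
    (PySem.List.pyRange 0 max_depth 1).foldl (fun rows d =>
      let row : List Char :=
        (PySem.List.pyRange 0 (cols.length : Int) 1).foldl (fun row c =>
          let col := PySem.List.pyGetD cols c []
          if d < (col.length : Int) then
            row ++ delimiter.toList ++ [PySem.List.pyGetD col d ' ']
          else
            row ++ delimiter.toList ++ [' ']) []
      rows ++ [row ++ delimiter.toList]) []
  -- the as_rows = true, nonempty-columns branch (a list[str] in Python) is not representable as String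
  -- and lies outside Pre_; the string join is returned
  String.mk (PySem.Chars.join ['\n'] rows)

-- ===== PORT B =====
-- literal port of B: max of the lengths, then a fold over the columns updating every row buffer
def visualize_columns_alt (columns : List String) (delimiter : String) (as_rows : Bool) : String :=
  if columns.length = 0 then "" else
  let depth : Nat := (columns.map (fun c => c.toList.length)).foldl Nat.max 0
  let rows : List (List Char) :=
    columns.foldl (fun rows col =>
      let padded : List Char := col.toList ++ List.replicate (depth - col.toList.length) ' '
      (rows.zip padded).map (fun p => p.1 ++ p.2 :: delimiter.toList))
    (List.replicate depth delimiter.toList)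
  String.mk (PySem.Chars.join ['\n'] rows)

-- ===== PRECONDITION & SPEC =====
-- Pre_ admits every input whose Python value IS a str: as_rows = false, and also as_rows = true with empty
-- columns (A returns '' there). Only as_rows = true with nonempty columns is excluded, solely because A (and
-- B, identically) return a list[str] there, which this file's String return type cannot represent — not
-- because the behaviours differ (they agree, see the cite in the claim).
def Pre_visualize_columns (columns : List String) (delimiter : String) (as_rows : Bool) : Prop :=
  as_rows = false ∨ columns = []
instance (columns : List String) (delimiter : String) (as_rows : Bool) : Decidable (Pre_visualize_columns columns delimiter as_rows) := by unfold Pre_visualize_columns; infer_instance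

def pvWitness_visualize_columns : List String × String × Bool := (["ab", "c"], "|", false)

def Spec_visualize_columns (columns : List String) (delimiter : String) (as_rows : Bool) (out : String) : Prop := out = visualize_columns_alt columns delimiter as_rows
instance (columns : List String) (delimiter : String) (as_rows : Bool) (out : String) : Decidable (Spec_visualize_columns columns delimiter as_rows out) := by unfold Spec_visualize_columns; infer_instance

-- ===== CLAIM (what is proved, stated in full; the proofs are below) =====
def Claim_equal_visualize_columns : Prop := ∀ (columns : List String) (delimiter : String) (as_rows : Bool), Dom_visualize_columns columns delimiter as_rows → Pre_visualize_columns columns delimiter as_rows → Spec_visualize_columns columns delimiter as_rows (visualize_columns columns delimiter as_rows)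

-- ===== LEMMAS AND PROOFS =====

-- casting A's running Int max over the column lengths to B's Nat max loop
lemma foldl_max_len_cast (ls : List (List Char)) (a : Nat) :
    (ls.map (fun c => (c.length : Int))).foldl max (a : Int)
      = (((ls.map List.length).foldl Nat.max a : Nat) : Int) := by
  induction ls generalizing a with
  | nil => rfl
  | cons c t ih =>
      rw [List.map_cons, List.foldl_cons, List.map_cons, List.foldl_cons, ← Nat.cast_max]
      exact ih (a.max c.length)

-- A's max over a nonempty list equals B's fold from 0
lemma maxA_eq_depth (cs : List String) (h : cs ≠ []) :
    ((PySem.List.max? ((cs.map String.toList).map (fun c => (c.length : Int))) (fun x => x)).getD 0)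
      = (((cs.map (fun c => c.toList.length)).foldl Nat.max 0 : Nat) : Int) := by
  cases cs with
  | nil => exact absurd rfl h
  | cons c t =>
      rw [List.map_cons, List.map_cons, PySem.List.max?_id_cons, Option.getD_some, foldl_max_len_cast]
      have hmm : ∀ l : List String, (l.map String.toList).map List.length = l.map (fun c => c.toList.length) := by
        intro l; simp [List.map_map, Function.comp]
      rw [hmm]
      congr 1

-- delimiter-before-each-cell plus trailing delimiter = leading delimiter plus cell-then-delimiter
lemma flatMap_delim (D : List Char) {α : Type} (l : List α) (g : α → Char) :
    l.flatMap (fun c => D ++ [g c]) ++ D = D ++ l.flatMap (fun c => g c :: D) := by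
  induction l with
  | nil => simp
  | cons x t ih => simp [List.flatMap_cons, ← ih]

-- padded column indexing
lemma padded_getElem (col : List Char) (depth k : Nat) (hk : k < depth)
    (hlen : k < (col ++ List.replicate (depth - col.length) ' ').length) :
    (col ++ List.replicate (depth - col.length) ' ')[k] = col.getD k ' ' := by
  by_cases h : k < col.length
  · rw [List.getElem_append_left h, List.getD_eq_getElem col ' ' h]
  · rw [List.getElem_append_right (Nat.le_of_not_lt h), List.getElem_replicate,
        List.getD_eq_default col ' ' (Nat.le_of_not_lt h)]

-- one step of B's fold on a row vector given as a map over List.range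
lemma b_step (D : List Char) (depth : Nat) (f : Nat → List Char) (col : List Char) :
    (((List.range depth).map f).zip (col ++ List.replicate (depth - col.length) ' ')).map
        (fun p => p.1 ++ p.2 :: D)
      = (List.range depth).map (fun k => f k ++ col.getD k ' ' :: D) := by
  have hpad : depth ≤ (col ++ List.replicate (depth - col.length) ' ').length := by
    simp [List.length_append, List.length_replicate]; omega
  apply List.ext_getElem
  · simp [List.length_zip, List.length_map, List.length_range]; omega
  · intro k h1 h2
    have hk : k < depth := by
      simpa [List.length_map, List.length_zip, List.length_range] using h2
    have hkp : k < (col ++ List.replicate (depth - col.length) ' ').length :=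
      lt_of_lt_of_le hk hpad
    simp only [List.getElem_map, List.getElem_zip, List.getElem_range]
    rw [padded_getElem col depth k hk hkp]

-- B's whole fold, by induction with a generalized row vector
lemma b_fold (D : List Char) (depth : Nat) (cs : List String) (f : Nat → List Char) :
    cs.foldl (fun rows col =>
        (rows.zip (col.toList ++ List.replicate (depth - col.toList.length) ' ')).map
          (fun p => p.1 ++ p.2 :: D))
      ((List.range depth).map f)
      = (List.range depth).map (fun k => f k ++ cs.flatMap (fun col => col.toList.getD k ' ' :: D)) := by
  induction cs generalizing f with
  | nil => simp
  | cons c t ih =>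
      rw [List.foldl_cons, b_step D depth f c.toList, ih]
      simp [List.flatMap_cons, List.append_assoc]

-- A's inner loop is a flatMap over the columns
lemma a_row (D : List Char) (cols : List (List Char)) (k : Nat) :
    (PySem.List.pyRange 0 (cols.length : Int) 1).foldl (fun row c =>
        let col := PySem.List.pyGetD cols c []
        if (k : Int) < (col.length : Int) then
          row ++ D ++ [PySem.List.pyGetD col (k : Int) ' ']
        else
          row ++ D ++ [' ']) []
      = cols.flatMap (fun col => D ++ [col.getD k ' ']) := by
  rw [PySem.List.foldl_pyRange_zero_pyGetD' cols []
      (fun row col => if (k : Int) < (col.length : Int) then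
          row ++ D ++ [PySem.List.pyGetD col (k : Int) ' ']
        else row ++ D ++ [' ']) []]
  rw [PySem.List.foldl_congr_mem
      (g := fun row col => row ++ (D ++ [col.getD k ' ']))]
  · exact PySem.List.foldl_append_eq_flatMap _ _ _
  · intro acc col _
    by_cases h : (k : Int) < (col.length : Int)
    · have hk : k < col.length := by exact_mod_cast h
      simp [h, PySem.List.pyGetD_natCast, List.getD_eq_getElem col ' ' hk, List.append_assoc]
    · have hk : col.length ≤ k := by omega
      simp [h, List.append_assoc, List.getD, List.getElem?_eq_none hk]

-- ===== VERDICT (by name: the statement is the Claim_ definition above) =====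
theorem visualize_columns_spec : Claim_equal_visualize_columns := by
  intro columns delimiter as_rows _ _
  show visualize_columns columns delimiter as_rows = visualize_columns_alt columns delimiter as_rows
  cases columns with
  | nil => rfl
  | cons c0 ct =>
    unfold visualize_columns visualize_columns_alt
    simp only [List.length_cons, if_neg (by simp : ¬ (c0 :: ct).length = 0)]
    set cs := c0 :: ct with hcs
    set D := delimiter.toList with hD
    have hne : (cs.map (fun c => c.toList.length)) ≠ [] := by simp [hcs]
    set depth : Nat := (cs.map (fun c => c.toList.length)).foldl Nat.max 0 with hdepth
    have hmax := maxA_eq_depth cs (by simp [hcs])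
    rw [hmax]
    -- rewrite A's rows
    have hArows :
        (PySem.List.pyRange 0 (depth : Int) 1).foldl (fun rows d =>
            rows ++ [((PySem.List.pyRange 0 ((cs.map String.toList).length : Int) 1).foldl (fun row c =>
                let col := PySem.List.pyGetD (cs.map String.toList) c []
                if d < (col.length : Int) then row ++ D ++ [PySem.List.pyGetD col d ' ']
                else row ++ D ++ [' ']) []) ++ D]) []
          = (List.range depth).map (fun k =>
              (cs.map String.toList).flatMap (fun col => D ++ [col.getD k ' ']) ++ D) := by
      rw [PySem.List.foldl_append_singleton_eq_map]
      rw [PySem.List.pyRange_one 0 (depth : Int)]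
      simp only [sub_zero, Int.toNat_natCast, List.map_map, List.nil_append]
      apply List.map_congr_left
      intro k _
      simp only [Function.comp]
      rw [show ((0 : Int) + (k : Int)) = (k : Int) by omega]
      rw [a_row D (cs.map String.toList) k]
    rw [hArows]
    -- rewrite B's rows
    have hBinit : (List.replicate depth D) = (List.range depth).map (fun _ => D) := by
      simp [List.map_const]
    rw [hBinit, b_fold D depth cs (fun _ => D)]
    -- rows are equal elementwise
    congr 1
    congr 1
    congr 1
    apply List.map_congr_left
    intro k _
    rw [← flatMap_delim D cs (fun col => col.toList.getD k ' ')]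
    congr 1
    rw [List.flatMap_map]
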